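-- pv_equiv track=rewrite | github.com/ArnavChawla/Codejam | 2018/2018a.py | calculate
-- ===== SOURCE A (Python) =====
-- def calculate(string):
--     total = 0
--     strength = 1
--     dealt = 0
--     for char in string:
--         if(char == 'C'):
--             strength *=2
--         else:
--             dealt += strength
--     return dealt
-- ===== SOURCE B (Python) =====
-- def calculate(string):
--     dealt = 0
--     for char in reversed(string):
--         if char == 'C':
--             dealt *= 2
--         else:
--             dealt += 1
--     return dealt
-- ===== Notes on version B (the rewrite author's own statement) =====
-- stated objective: alternative
-- what changed: Traverses the string right-to-left with a single accumulator, doubling the damage already accumulated at each 'C', instead of A's left-to-right pass maintaining a separate doubling strength variable.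
import Mathlib
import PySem

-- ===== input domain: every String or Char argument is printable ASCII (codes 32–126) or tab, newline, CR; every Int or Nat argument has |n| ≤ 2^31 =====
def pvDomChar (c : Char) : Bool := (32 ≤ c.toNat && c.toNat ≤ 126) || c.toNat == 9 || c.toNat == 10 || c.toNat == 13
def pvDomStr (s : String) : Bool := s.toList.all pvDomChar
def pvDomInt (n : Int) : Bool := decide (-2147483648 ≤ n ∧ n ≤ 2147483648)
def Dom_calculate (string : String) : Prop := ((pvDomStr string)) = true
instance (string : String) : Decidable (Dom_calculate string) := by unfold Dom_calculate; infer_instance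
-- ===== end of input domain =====

-- B traverses the string right-to-left doubling the accumulated damage at each 'C',
-- replacing A's left-to-right pass with a separate doubling strength variable; alternative, same cost.

-- ===== PORT A =====
def calculate (string : String) : Int :=
  -- total = 0 is unused in A; strength, dealt threaded as a pair
  (string.toList.foldl
    (fun (st : Int × Int) char =>
      if char = 'C' then (st.1 * 2, st.2) else (st.1, st.2 + st.1))
    (1, 0)).2

-- ===== PORT B =====
def calculate_alt (string : String) : Int :=
  -- reversed(string) is the reversed character list
  string.toList.reverse.foldl
    (fun dealt char => if char = 'C' then dealt * 2 else dealt + 1)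
    0

-- ===== PRECONDITION & SPEC =====
def Spec_calculate (string : String) (out : Int) : Prop := out = calculate_alt string
instance (string : String) (out : Int) : Decidable (Spec_calculate string out) := by unfold Spec_calculate; infer_instance

-- ===== CLAIM (what is proved, stated in full; the proofs are below) =====
def Claim_equal_calculate : Prop := ∀ (string : String), Dom_calculate string → Spec_calculate string (calculate string)

-- ===== LEMMAS AND PROOFS =====

-- common characterisation: damage dealt by a suffix that starts at strength 1
def pvG : List Char → Int
  | [] => 0
  | c :: t => if c = 'C' then 2 * pvG t else 1 + pvG t

theorem pvA_fold (l : List Char) : ∀ (k d : Int),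
    (l.foldl (fun (st : Int × Int) char =>
      if char = 'C' then (st.1 * 2, st.2) else (st.1, st.2 + st.1)) (k, d)).2
    = d + k * pvG l := by
  induction l with
  | nil => intro k d; simp [pvG]
  | cons c t ih =>
    intro k d
    by_cases hc : c = 'C' <;> simp [hc, pvG, ih] <;> ring

theorem pvB_fold (l : List Char) :
    l.foldr (fun char dealt => if char = 'C' then dealt * 2 else dealt + 1) 0 = pvG l := by
  induction l with
  | nil => simp [pvG]
  | cons c t ih =>
    by_cases hc : c = 'C' <;> simp [hc, pvG, ih] <;> ring

-- ===== VERDICT (by name: the statement is the Claim_ definition above) =====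
theorem calculate_spec : Claim_equal_calculate := by
  intro s _
  unfold Spec_calculate calculate calculate_alt
  rw [pvA_fold, List.foldl_reverse]
  simp only [pvB_fold]
  ring
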